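-- pv_equiv track=rewrite | github.com/SanazZaher/Battle_ship | battleship_game.py | check_adjacency
-- ===== SOURCE A (Python) =====
-- def check_adjacency(grid, positions):
--     """Check for adjacency with existing ships."""
--     for row, col in positions:
--         for dr in [-1, 0, 1]:
--             for dc in [-1, 0, 1]:
--                 nr, nc = row + dr, col + dc
--                 if 0 <= nr < 10 and 0 <= nc < 10 and grid[nr][nc] != ".":
--                     return True
--     return False
-- ===== SOURCE B (Python) =====
-- def check_adjacency(grid, positions):
--     """Check for adjacency with existing ships."""
--     occupied = [(r, c)
--                 for r, row in enumerate(grid[:10])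
--                 for c, cell in enumerate(row[:10])
--                 if cell != "."]
--     forbidden = {(r + dr, c + dc)
--                  for r, c in occupied
--                  for dr in (-1, 0, 1)
--                  for dc in (-1, 0, 1)}
--     return any(pos in forbidden for pos in positions)
-- ===== Notes on version B (the rewrite author's own statement) =====
-- stated objective: alternative
-- what changed: Instead of probing the grid per position per offset, B scans the board once for occupied cells, builds a set of all cells adjacent to (or equal to) an occupied cell, and answers each position by one set-membership test.
import Mathlib
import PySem

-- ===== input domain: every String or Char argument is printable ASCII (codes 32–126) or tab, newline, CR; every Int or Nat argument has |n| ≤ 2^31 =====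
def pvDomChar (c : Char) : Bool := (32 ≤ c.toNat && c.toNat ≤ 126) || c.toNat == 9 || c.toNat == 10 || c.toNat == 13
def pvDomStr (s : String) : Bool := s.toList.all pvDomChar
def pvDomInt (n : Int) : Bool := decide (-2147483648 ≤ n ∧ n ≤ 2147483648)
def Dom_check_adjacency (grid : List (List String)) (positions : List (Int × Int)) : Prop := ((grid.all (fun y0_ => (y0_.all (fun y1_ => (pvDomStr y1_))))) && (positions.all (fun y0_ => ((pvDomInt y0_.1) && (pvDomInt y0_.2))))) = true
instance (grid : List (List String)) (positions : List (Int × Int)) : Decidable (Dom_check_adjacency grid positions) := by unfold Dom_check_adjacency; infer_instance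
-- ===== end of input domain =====

-- B scans the board once for occupied cells and answers each position by membership in a
-- precomputed "forbidden" set (occupied cells and their 8 neighbours), instead of probing
-- the grid per position per offset; alternative decomposition, return value only.

-- ===== PORT A =====
def check_adjacency (grid : List (List String)) (positions : List (Int × Int)) : Bool :=
  positions.any fun rc =>
    ([-1, 0, 1] : List Int).any fun dr =>
      ([-1, 0, 1] : List Int).any fun dc =>
        decide (0 ≤ rc.1 + dr) && decide (rc.1 + dr < 10) &&
        decide (0 ≤ rc.2 + dc) && decide (rc.2 + dc < 10) &&
        (PySem.List.pyGetD (PySem.List.pyGetD grid (rc.1 + dr) []) (rc.2 + dc) "." ≠ ".")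

-- ===== PORT B =====
-- occupied = [(r, c) for r, row in enumerate(grid[:10]) for c, cell in enumerate(row[:10]) if cell != "."]
def pvOccupied (grid : List (List String)) : List (Int × Int) :=
  (PySem.List.enumerate (PySem.List.slice grid none (some 10)) 0).flatMap fun rrow =>
    (PySem.List.enumerate (PySem.List.slice rrow.2 none (some 10)) 0).filterMap fun ccell =>
      if ccell.2 ≠ "." then some (rrow.1, ccell.1) else none

-- forbidden = {(r+dr, c+dc) for r, c in occupied for dr in (-1,0,1) for dc in (-1,0,1)}
def pvForbidden (grid : List (List String)) : PySem.Set (Int × Int) :=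
  PySem.Set.ofList <|
    (pvOccupied grid).flatMap fun rc =>
      ([-1, 0, 1] : List Int).flatMap fun dr =>
        ([-1, 0, 1] : List Int).map fun dc => (rc.1 + dr, rc.2 + dc)

def check_adjacency_alt (grid : List (List String)) (positions : List (Int × Int)) : Bool :=
  positions.any fun pos => PySem.Set.contains (pvForbidden grid) pos

-- ===== PRECONDITION & SPEC =====
-- helper predicates for Pre_: an offset index a (0,1,2) stands for delta a-1
def pvInBox (p : Int × Int) (dr dc : Int) : Bool :=
  decide (0 ≤ p.1 + dr) && decide (p.1 + dr < 10) && decide (0 ≤ p.2 + dc) && decide (p.2 + dc < 10)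
def pvCellExists (grid : List (List String)) (p : Int × Int) (dr dc : Int) : Bool :=
  decide ((p.1 + dr).toNat < grid.length) &&
  decide ((p.2 + dc).toNat < (grid.getD (p.1 + dr).toNat []).length)
-- scan event at (position i, offset indices a b): GOOD = occupied cell found, BAD = IndexError
def pvGood (grid : List (List String)) (p : Int × Int) (a b : Nat) : Bool :=
  pvInBox p ((a : Int) - 1) ((b : Int) - 1) && pvCellExists grid p ((a : Int) - 1) ((b : Int) - 1) &&
  decide ((grid.getD (p.1 + ((a : Int) - 1)).toNat []).getD (p.2 + ((b : Int) - 1)).toNat "." ≠ ".")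
def pvBad (grid : List (List String)) (p : Int × Int) (a b : Nat) : Bool :=
  pvInBox p ((a : Int) - 1) ((b : Int) - 1) && !(pvCellExists grid p ((a : Int) - 1) ((b : Int) - 1))

-- Pre_ is exactly the inputs on which Python A returns: it raises IndexError iff its scan,
-- in order, reaches a cell inside the 0..9 box but outside the actual grid (BAD) before it
-- finds an occupied cell (GOOD); Pre_ demands every BAD access be preceded by a GOOD one
-- (scan step number 9*i + 3*a + b encodes position index i and offset indices a, b).
def Pre_check_adjacency (grid : List (List String)) (positions : List (Int × Int)) : Prop :=
  ∀ i < positions.length, ∀ a < 3, ∀ b < 3,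
    pvBad grid (positions.getD i (0, 0)) a b = true →
      ∃ t < 9 * i + 3 * a + b,
        pvGood grid (positions.getD (t / 9) (0, 0)) (t % 9 / 3) (t % 3) = true
instance (grid : List (List String)) (positions : List (Int × Int)) : Decidable (Pre_check_adjacency grid positions) := by unfold Pre_check_adjacency; infer_instance

def pvWitness_check_adjacency : List (List String) × (List (Int × Int)) :=
  ([[".", "X", ".", ".", ".", ".", ".", ".", ".", "."],
    [".", ".", ".", ".", ".", ".", ".", ".", ".", "."],
    [".", ".", ".", ".", ".", ".", ".", ".", ".", "."],
    [".", ".", ".", ".", ".", ".", ".", ".", ".", "."],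
    [".", ".", ".", ".", ".", ".", ".", ".", ".", "."],
    [".", ".", ".", ".", ".", ".", ".", ".", ".", "."],
    [".", ".", ".", ".", ".", ".", ".", ".", ".", "."],
    [".", ".", ".", ".", ".", ".", ".", ".", ".", "."],
    [".", ".", ".", ".", ".", ".", ".", ".", ".", "."],
    [".", ".", ".", ".", ".", ".", ".", ".", ".", "."]],
   [(5, 5), (0, 2)])

def Spec_check_adjacency (grid : List (List String)) (positions : List (Int × Int)) (out : Bool) : Prop := out = check_adjacency_alt grid positions
instance (grid : List (List String)) (positions : List (Int × Int)) (out : Bool) : Decidable (Spec_check_adjacency grid positions out) := by unfold Spec_check_adjacency; infer_instance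

-- ===== CLAIM (what is proved, stated in full; the proofs are below) =====
def Claim_equal_check_adjacency : Prop := ∀ (grid : List (List String)) (positions : List (Int × Int)), Dom_check_adjacency grid positions → Pre_check_adjacency grid positions → Spec_check_adjacency grid positions (check_adjacency grid positions)

-- ===== LEMMAS AND PROOFS =====

theorem slice10 {α : Type} (xs : List α) :
    PySem.List.slice xs none (some (10 : Int)) = xs.take 10 := by
  rw [PySem.List.slice_to _ (by norm_num)]; rfl

-- an occupied cell: inside the grid and the 10x10 box, and not "."
def OccP (grid : List (List String)) (nr nc : Int) : Prop :=
  0 ≤ nr ∧ nr < 10 ∧ 0 ≤ nc ∧ nc < 10 ∧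
  nr.toNat < grid.length ∧ nc.toNat < (grid.getD nr.toNat []).length ∧
  (grid.getD nr.toNat []).getD nc.toNat "." ≠ "."

theorem mem_pvOccupied (grid : List (List String)) (nr nc : Int) :
    (nr, nc) ∈ pvOccupied grid ↔ OccP grid nr nc := by
  unfold pvOccupied OccP
  simp only [slice10, List.mem_flatMap, List.mem_filterMap, PySem.List.mem_enumerate_iff,
    Option.ite_none_right_eq_some, Option.some.injEq, Prod.mk.injEq, List.length_take,
    List.getElem_take, zero_add]
  constructor
  · rintro ⟨rrow, ⟨k, hk, rfl⟩, ccell, ⟨j, hj, rfl⟩, hne, h1, h2⟩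
    dsimp only at hj hne h1 h2
    subst h1; subst h2
    have hk' : k < grid.length := by omega
    have hrow : grid.getD k [] = grid[k] := List.getD_eq_getElem _ _ hk'
    have hj' : j < grid[k].length := by omega
    refine ⟨by positivity, by exact_mod_cast (by omega : k < 10), by positivity,
      by exact_mod_cast (by omega : j < 10), ?_, ?_, ?_⟩ <;>
      simp only [Int.toNat_natCast, hrow]
    · exact hk'
    · exact hj'
    · rw [List.getD_eq_getElem _ _ hj']; exact hne
  · rintro ⟨h0r, hr10, h0c, hc10, hrl, hcl, hne⟩
    rw [List.getD_eq_getElem _ _ hrl] at hcl hne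
    rw [List.getD_eq_getElem _ _ hcl] at hne
    refine ⟨_, ⟨nr.toNat, by omega, rfl⟩, _, ⟨nc.toNat, by dsimp only; omega, rfl⟩,
      by dsimp only; exact hne, by dsimp only; omega, by dsimp only; omega⟩

theorem mem_pvForbidden (grid : List (List String)) (p : Int × Int) :
    p ∈ pvForbidden grid ↔
      ∃ dr ∈ ([-1, 0, 1] : List Int), ∃ dc ∈ ([-1, 0, 1] : List Int),
        OccP grid (p.1 + dr) (p.2 + dc) := by
  unfold pvForbidden
  rw [PySem.Set.mem_ofList]
  simp only [List.mem_flatMap, List.mem_map]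
  constructor
  · rintro ⟨⟨a, b⟩, hocc, dr, hdr, dc, hdc, rfl⟩
    rw [mem_pvOccupied] at hocc
    refine ⟨-dr, by simp at hdr ⊢; omega, -dc, by simp at hdc ⊢; omega, ?_⟩
    dsimp only
    rw [add_neg_cancel_right, add_neg_cancel_right]
    exact hocc
  · rintro ⟨dr, hdr, dc, hdc, hocc⟩
    refine ⟨(p.1 + dr, p.2 + dc), (mem_pvOccupied _ _ _).mpr hocc,
      -dr, by simp at hdr ⊢; omega, -dc, by simp at hdc ⊢; omega, ?_⟩
    dsimp only
    rw [add_neg_cancel_right, add_neg_cancel_right]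

theorem cell_eq (grid : List (List String)) (nr nc : Int)
    (h1 : 0 ≤ nr) (h3 : 0 ≤ nc) :
    PySem.List.pyGetD (PySem.List.pyGetD grid nr []) nc "." =
      (grid.getD nr.toNat []).getD nc.toNat "." := by
  rw [PySem.List.pyGetD_of_nonneg _ _ h1, PySem.List.pyGetD_of_nonneg _ _ h3]

theorem inner_eq (grid : List (List String)) (p : Int × Int) :
    (([-1, 0, 1] : List Int).any fun dr =>
      ([-1, 0, 1] : List Int).any fun dc =>
        decide (0 ≤ p.1 + dr) && decide (p.1 + dr < 10) &&
        decide (0 ≤ p.2 + dc) && decide (p.2 + dc < 10) &&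
        (PySem.List.pyGetD (PySem.List.pyGetD grid (p.1 + dr) []) (p.2 + dc) "." ≠ "."))
    = PySem.Set.contains (pvForbidden grid) p := by
  rw [Bool.eq_iff_iff]
  rw [PySem.Set.contains_iff, mem_pvForbidden]
  simp only [List.any_eq_true, Bool.and_eq_true, decide_eq_true_eq]
  constructor
  · rintro ⟨dr, hdr, dc, hdc, ⟨⟨⟨hg1, hg2⟩, hg3⟩, hg4⟩, hne⟩
    rw [cell_eq grid _ _ hg1 hg3] at hne
    have hb1 : (p.1 + dr).toNat < grid.length := by
      by_contra h; push Not at h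
      rw [List.getD_eq_default _ _ h] at hne
      simp [List.getD] at hne
    have hb2 : (p.2 + dc).toNat < (grid.getD (p.1 + dr).toNat []).length := by
      by_contra h; push Not at h
      rw [List.getD_eq_default _ _ h] at hne
      exact hne rfl
    exact ⟨dr, hdr, dc, hdc, hg1, hg2, hg3, hg4, hb1, hb2, hne⟩
  · rintro ⟨dr, hdr, dc, hdc, hg1, hg2, hg3, hg4, hl1, hl2, hne⟩
    exact ⟨dr, hdr, dc, hdc, ⟨⟨⟨hg1, hg2⟩, hg3⟩, hg4⟩,
      by rw [cell_eq grid _ _ hg1 hg3]; exact hne⟩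

theorem any_congr_mem {α : Type} (l : List α) (f g : α → Bool)
    (h : ∀ x ∈ l, f x = g x) : l.any f = l.any g := by
  induction l with
  | nil => rfl
  | cons x xs ih =>
    rw [List.any_cons, List.any_cons, h x (List.mem_cons_self),
        ih (fun y hy => h y (List.mem_cons_of_mem _ hy))]

-- ===== VERDICT (by name: the statement is the Claim_ definition above) =====
theorem check_adjacency_spec : Claim_equal_check_adjacency := by
  intro grid positions _ _
  unfold Spec_check_adjacency check_adjacency check_adjacency_alt
  exact any_congr_mem _ _ _ (fun p _ => inner_eq grid p)
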